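-- pv_equiv track=rewrite | github.com/953250587/leetcode-python | CreateMaximumNumber_HARD_321.py | maxNumber_1
-- ===== SOURCE A (Python) =====
-- def maxNumber_1(nums1, nums2, k):
--     """
--     :type nums1: List[int]
--     :type nums2: List[int]
--     :type k: int
--     :rtype: List[int]
--     505ms
--     """
--
--     def prep(nums, k):
--         drop = len(nums) - k
--         out = []
--         for num in nums:
--             while drop and out and out[-1] < num:
--                 out.pop()
--                 drop -= 1
--             out.append(num)
--         return out[:k]
--
--     def merge(a, b):
--         return [max(a, b).pop(0) for _ in a + b]
--
--     return max(merge(prep(nums1, i), prep(nums2, k - i))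
--                for i in range(k + 1)
--                if i <= len(nums1) and k - i <= len(nums2))
-- ===== SOURCE B (Python) =====
-- def maxNumber_1(nums1, nums2, k):
--     def pick(nums, t):
--         # monotonic stack: pop a smaller digit while enough digits remain to reach t
--         n = len(nums)
--         st = []
--         sl = 0          # == len(st)
--         avail = n       # == n - idx, digits not yet consumed
--         for x in nums:
--             while sl and st[-1] < x and sl + avail > t:
--                 st.pop()
--                 sl -= 1
--             st.append(x)
--             sl += 1
--             avail -= 1
--         return st[:t]
--
--     def merge(a, b):
--         out = []
--         i = j = 0
--         la = len(a)
--         lb = len(b)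
--         while i < la and j < lb:
--             ai = a[i]
--             bj = b[j]
--             if ai > bj:
--                 out.append(ai); i += 1
--             elif ai < bj:
--                 out.append(bj); j += 1
--             elif a[i:] >= b[j:]:        # heads tie: lexicographic suffix comparison
--                 out.append(ai); i += 1
--             else:
--                 out.append(bj); j += 1
--         out.extend(a[i:])
--         out.extend(b[j:])
--         return out
--
--     best = None
--     lo = max(0, k - len(nums2))
--     hi = min(k, len(nums1))
--     for i in range(lo, hi + 1):
--         cand = merge(pick(nums1, i), pick(nums2, k - i))
--         if best is None or cand > best:
--             best = cand
--     return best
-- ===== Notes on version B (the rewrite author's own statement) =====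
-- stated objective: alternative
-- what changed: Replaces the pop(0)-on-max(a,b) merge comprehension by an index-pointer merge that compares heads first and falls back to a lexicographic suffix comparison on ties, replaces the drop counter in the greedy stack by a remaining-digits bound, and replaces max() over a filtered generator by a running-best loop over the exact split range [max(0,k-len(nums2)), min(k,len(nums1))].
import Mathlib
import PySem

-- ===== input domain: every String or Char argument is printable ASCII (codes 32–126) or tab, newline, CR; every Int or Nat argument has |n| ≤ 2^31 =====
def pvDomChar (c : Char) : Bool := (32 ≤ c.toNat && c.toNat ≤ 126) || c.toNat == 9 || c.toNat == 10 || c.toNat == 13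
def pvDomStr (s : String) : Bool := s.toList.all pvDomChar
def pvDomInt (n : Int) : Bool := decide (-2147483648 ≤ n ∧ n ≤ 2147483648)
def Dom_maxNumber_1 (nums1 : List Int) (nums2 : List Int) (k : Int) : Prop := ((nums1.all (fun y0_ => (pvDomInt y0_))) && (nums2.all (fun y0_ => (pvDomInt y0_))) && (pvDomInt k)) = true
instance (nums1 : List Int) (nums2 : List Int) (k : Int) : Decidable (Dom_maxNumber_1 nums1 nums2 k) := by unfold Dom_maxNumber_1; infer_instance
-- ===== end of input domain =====

-- B replaces A's pop(0)-on-max(a,b) merge by an index-pointer merge (heads compared first,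
-- a suffix comparison on ties), A's drop counter by a remaining-digits bound, and A's max()
-- over a filtered generator by a running-best loop over the exact split range (alternative).

-- ===== PORT A =====

-- Python's builtin lexicographic '>' on two int lists (used by A's max(a, b) / max(gen)
-- and by B's 'cand > best'); exact for int lists.
def pyListGt : List Int → List Int → Bool
  | [], _ => false
  | _ :: _, [] => true
  | x :: xs, y :: ys => if x > y then true else if y > x then false else pyListGt xs ys

-- A's inner while: 'while drop and out and out[-1] < num: out.pop(); drop -= 1'
def pvPopA (drop : Int) (out : List Int) (num : Int) : Int × List Int :=
  if h : drop ≠ 0 ∧ out ≠ [] ∧ out.getLast! < num then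
    pvPopA (drop - 1) out.dropLast num
  else (drop, out)
termination_by out.length
decreasing_by
  have : out.length ≠ 0 := fun hl => h.2.1 (List.eq_nil_of_length_eq_zero hl)
  simp [List.length_dropLast]; omega

-- A's prep(nums, k)
def pvPrepA (nums : List Int) (k : Int) : List Int :=
  let st := nums.foldl (fun s num =>
      let s' := pvPopA s.1 s.2 num
      (s'.1, s'.2 ++ [num])) (((nums.length : Int) - k), ([] : List Int))
  PySem.List.slice st.2 none (some k)    -- out[:k]

-- A's merge(a, b) = [max(a, b).pop(0) for _ in a + b]
-- (state = the two mutated lists + the output built so far; max(a,b) is b iff b > a)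
def pvMergeA (a b : List Int) : List Int :=
  ((a ++ b).foldl (fun (s : List Int × List Int × List Int) _ =>
      if pyListGt s.2.1 s.1 then
        match s.2.1 with
        | y :: ys => (s.1, ys, s.2.2 ++ [y])
        | [] => s                 -- unreachable: pyListGt _ [] over an empty list is false
      else
        match s.1 with
        | x :: xs => (xs, s.2.1, s.2.2 ++ [x])
        | [] => s                 -- unreachable: both lists empty only after all steps
      ) (a, b, ([] : List Int))).2.2

def maxNumber_1 (nums1 : List Int) (nums2 : List Int) (k : Int) : List Int :=
  let cands := ((PySem.List.pyRange 0 (k + 1) 1).filter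
      (fun i => decide (i ≤ (nums1.length : Int)) && decide (k - i ≤ (nums2.length : Int)))).map
      (fun i => pvMergeA (pvPrepA nums1 i) (pvPrepA nums2 (k - i)))
  match cands with
  | [] => []                      -- Python: max() of an empty generator raises ValueError (outside Pre_)
  | c :: cs => cs.foldl (fun m c' => if pyListGt c' m then c' else m) c

-- ===== PORT B =====

-- B's inner while: pop while the stack top is smaller and enough digits remain to reach t
def pvPopB (st : List Int) (x rem t : Int) : List Int :=
  if h : st ≠ [] ∧ st.getLast! < x ∧ (st.length : Int) + rem > t then
    pvPopB st.dropLast x rem t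
  else st
termination_by st.length
decreasing_by
  have : st.length ≠ 0 := fun hl => h.1 (List.eq_nil_of_length_eq_zero hl)
  simp [List.length_dropLast]; omega

-- B's pick(nums, t)
def pvPick (nums : List Int) (t : Int) : List Int :=
  let n : Int := nums.length
  let st := (PySem.List.enumerate nums 0).foldl
      (fun st p => pvPopB st p.2 (n - p.1) t ++ [p.2]) ([] : List Int)
  PySem.List.slice st none (some t)    -- st[:t]

-- Python's builtin lexicographic '>=' on two int lists (B's tie-breaking suffix
-- comparison a[i:] >= b[j:], applied to the suffixes themselves); exact for int lists.
def pvGeS : List Int → List Int → Bool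
  | _, [] => true
  | [], _ :: _ => false
  | x :: xs, y :: ys => if x ≠ y then x > y else pvGeS xs ys

-- B's merge(a, b): pointer merge (recursion on the two suffixes); heads are compared
-- first, the suffix comparison decides ties; the trailing extends are the base cases
def pvMergeB : List Int → List Int → List Int
  | [], b => b
  | x :: xs, [] => x :: xs
  | x :: xs, y :: ys =>
      if x > y then x :: pvMergeB xs (y :: ys)
      else if x < y then y :: pvMergeB (x :: xs) ys
      else if pvGeS (x :: xs) (y :: ys) then x :: pvMergeB xs (y :: ys)
      else y :: pvMergeB (x :: xs) ys
termination_by a b => a.length + b.length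

def maxNumber_1_alt (nums1 : List Int) (nums2 : List Int) (k : Int) : List Int :=
  let lo := max 0 (k - (nums2.length : Int))
  let hi := min k (nums1.length : Int)
  ((PySem.List.pyRange lo (hi + 1) 1).foldl
      (fun best i =>
        let c := pvMergeB (pvPick nums1 i) (pvPick nums2 (k - i))
        match best with
        | none => some c
        | some m => if pyListGt c m then some c else some m) (none : Option (List Int))).getD []

-- ===== PRECONDITION & SPEC =====

-- Pre_ excludes exactly the inputs where A's max() runs on an empty generator and raises
-- ValueError (k < 0 or k > len(nums1)+len(nums2)); A returns normally everywhere else.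
def Pre_maxNumber_1 (nums1 : List Int) (nums2 : List Int) (k : Int) : Prop :=
  0 ≤ k ∧ k ≤ (nums1.length : Int) + (nums2.length : Int)
instance (nums1 : List Int) (nums2 : List Int) (k : Int) : Decidable (Pre_maxNumber_1 nums1 nums2 k) := by unfold Pre_maxNumber_1; infer_instance

def pvWitness_maxNumber_1 : List Int × List Int × Int := ([3, 4], [6, 5], 3)

def Spec_maxNumber_1 (nums1 : List Int) (nums2 : List Int) (k : Int) (out : List Int) : Prop := out = maxNumber_1_alt nums1 nums2 k
instance (nums1 : List Int) (nums2 : List Int) (k : Int) (out : List Int) : Decidable (Spec_maxNumber_1 nums1 nums2 k out) := by unfold Spec_maxNumber_1; infer_instance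

-- ===== CLAIM (what is proved, stated in full; the proofs are below) =====
def Claim_equal_maxNumber_1 : Prop := ∀ (nums1 : List Int) (nums2 : List Int) (k : Int), Dom_maxNumber_1 nums1 nums2 k → Pre_maxNumber_1 nums1 nums2 k → Spec_maxNumber_1 nums1 nums2 k (maxNumber_1 nums1 nums2 k)

-- ===== LEMMAS AND PROOFS =====

theorem geS_eq_not_gt (a b : List Int) : pvGeS a b = !pyListGt b a := by
  induction a generalizing b with
  | nil => cases b <;> simp [pvGeS, pyListGt]
  | cons x xs ih =>
      cases b with
      | nil => simp [pvGeS, pyListGt]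
      | cons y ys =>
          simp only [pvGeS, pyListGt]
          by_cases h1 : x = y
          · subst h1; simp [ih]
          · rcases lt_trichotomy x y with h | h | h
            · simp [h1, not_lt.2 h.le, h]
            · exact absurd h h1
            · simp [h1, h, not_lt.2 h.le]

theorem mergeB_nil_right (a : List Int) : pvMergeB a [] = a := by
  cases a <;> simp [pvMergeB]

theorem mergeB_take_left (x y : Int) (xs ys : List Int)
    (h : pyListGt (y :: ys) (x :: xs) = false) :
    pvMergeB (x :: xs) (y :: ys) = x :: pvMergeB xs (y :: ys) := by
  have hge : pvGeS (x :: xs) (y :: ys) = true := by rw [geS_eq_not_gt, h]; rfl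
  rcases lt_trichotomy x y with hxy | hxy | hxy
  · simp [pyListGt, hxy] at h
  · subst hxy
    simp [pvMergeB, hge]
  · simp [pvMergeB, hxy]

theorem mergeB_take_right (x y : Int) (xs ys : List Int)
    (h : pyListGt (y :: ys) (x :: xs) = true) :
    pvMergeB (x :: xs) (y :: ys) = y :: pvMergeB (x :: xs) ys := by
  have hge : pvGeS (x :: xs) (y :: ys) = false := by rw [geS_eq_not_gt, h]; rfl
  rcases lt_trichotomy x y with hxy | hxy | hxy
  · simp [pvMergeB, hxy, not_lt.2 hxy.le]
  · subst hxy
    simp [pvMergeB, hge]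
  · simp [pyListGt, hxy, not_lt.2 hxy.le] at h

theorem merge_iter (n : Nat) :
    ∀ (a b acc : List Int), a.length + b.length = n →
    ((fun (s : List Int × List Int × List Int) =>
      if pyListGt s.2.1 s.1 then
        match s.2.1 with
        | y :: ys => (s.1, ys, s.2.2 ++ [y])
        | [] => s
      else
        match s.1 with
        | x :: xs => (xs, s.2.1, s.2.2 ++ [x])
        | [] => s)^[n] (a, b, acc)).2.2 = acc ++ pvMergeB a b := by
  induction n with
  | zero =>
      intro a b acc h
      have ha : a = [] := by cases a <;> simp_all
      have hb : b = [] := by cases b <;> simp_all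
      simp [ha, hb, pvMergeB]
  | succ n ih =>
      intro a b acc h
      rw [Function.iterate_succ_apply]
      match a, b with
      | [], [] => simp at h
      | [], y :: ys =>
          simp only [pyListGt, if_pos]
          rw [ih [] ys (acc ++ [y]) (by simp at h ⊢; omega)]
          cases ys <;> simp [pvMergeB]
      | x :: xs, [] =>
          simp only [pyListGt, if_neg, Bool.false_eq_true, not_false_eq_true]
          rw [ih xs [] (acc ++ [x]) (by simp at h ⊢; omega)]
          simp [mergeB_nil_right]
      | x :: xs, y :: ys =>
          by_cases hgt : pyListGt (y :: ys) (x :: xs) = true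
          · simp only [hgt, if_pos]
            rw [ih (x :: xs) ys (acc ++ [y]) (by simp at h ⊢; omega)]
            rw [mergeB_take_right x y xs ys hgt]
            simp
          · simp only [hgt, if_neg, Bool.false_eq_true, not_false_eq_true]
            rw [ih xs (y :: ys) (acc ++ [x]) (by simp at h ⊢; omega)]
            rw [mergeB_take_left x y xs ys (by simpa using hgt)]
            simp

theorem merge_eq (a b : List Int) : pvMergeA a b = pvMergeB a b := by
  unfold pvMergeA
  rw [show ∀ (l : List Int) (f : List Int × List Int × List Int → List Int × List Int × List Int) s,
      l.foldl (fun x _ => f x) s = f^[l.length] s from ?_, ]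
  · rw [List.length_append, merge_iter (a.length + b.length) a b [] rfl]; simp
  · intro l f s
    induction l generalizing s with
    | nil => rfl
    | cons x xs ih => simp [List.foldl_cons, ih, Function.iterate_succ_apply]

theorem pop_eq (x t rem : Int) :
    ∀ (n : Nat) (st : List Int) (d : Int), st.length ≤ n →
    d = (st.length : Int) + rem - t → 0 ≤ d →
    pvPopA d st x = (((pvPopB st x rem t).length : Int) + rem - t, pvPopB st x rem t)
      ∧ 0 ≤ ((pvPopB st x rem t).length : Int) + rem - t := by
  intro n
  induction n with
  | zero =>
      intro st d hn hd h0
      have hst : st = [] := List.eq_nil_of_length_eq_zero (Nat.le_zero.1 hn)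
      subst hst
      rw [pvPopA, pvPopB]
      simp at hd
      simp [hd]
      omega
  | succ n ih =>
      intro st d hn hd h0
      rw [pvPopA, pvPopB]
      by_cases hc : st ≠ [] ∧ st.getLast! < x ∧ (st.length : Int) + rem > t
      · have hca : d ≠ 0 ∧ st ≠ [] ∧ st.getLast! < x := by
          refine ⟨by omega, hc.1, hc.2.1⟩
        rw [dif_pos hca, dif_pos hc]
        have hlen : st.length ≠ 0 := fun hl => hc.1 (List.eq_nil_of_length_eq_zero hl)
        have h1 : st.dropLast.length ≤ n := by
          simp [List.length_dropLast]; omega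
        have h2 : d - 1 = (st.dropLast.length : Int) + rem - t := by
          simp [List.length_dropLast]; omega
        have h3 : (0:Int) ≤ d - 1 := by omega
        exact ih st.dropLast (d - 1) h1 h2 h3
      · have hca : ¬ (d ≠ 0 ∧ st ≠ [] ∧ st.getLast! < x) := by
          intro h
          exact hc ⟨h.2.1, h.2.2, by omega⟩
        rw [dif_neg hca, dif_neg hc]
        exact ⟨by rw [hd], by omega⟩

theorem fold_eq (L t : Int) :
    ∀ (rest : List Int) (idx : Int) (st : List Int) (d : Int),
    d = (st.length : Int) + (L - idx) - t → 0 ≤ d →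
    (rest.foldl (fun s num =>
        let s' := pvPopA s.1 s.2 num
        (s'.1, s'.2 ++ [num])) (d, st)).2
      = (PySem.List.enumerate rest idx).foldl
          (fun st p => pvPopB st p.2 (L - p.1) t ++ [p.2]) st := by
  intro rest
  induction rest with
  | nil => intro idx st d _ _; simp [PySem.List.enumerate_nil]
  | cons num rest ih =>
      intro idx st d hd h0
      rw [PySem.List.enumerate_cons]
      simp only [List.foldl_cons]
      obtain ⟨hpop, hge⟩ := pop_eq num t (L - idx) st.length st d le_rfl (by omega) h0
      rw [hpop]
      exact ih (idx + 1) (pvPopB st num (L - idx) t ++ [num])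
        (((pvPopB st num (L - idx) t).length : Int) + (L - idx) - t)
        (by simp; omega) (by omega)

theorem prep_eq (nums : List Int) (t : Int) (ht : t ≤ (nums.length : Int)) :
    pvPrepA nums t = pvPick nums t := by
  unfold pvPrepA pvPick
  have := fold_eq (nums.length : Int) t nums 0 [] ((nums.length : Int) - t)
    (by simp) (by omega)
  simp only at this ⊢
  rw [this]

theorem filter_range (k : Int) (n1 n2 : Nat) :
    (PySem.List.pyRange 0 (k + 1) 1).filter
      (fun i => decide (i ≤ (n1 : Int)) && decide (k - i ≤ (n2 : Int)))
    = PySem.List.pyRange (max 0 (k - (n2 : Int))) (min k (n1 : Int) + 1) 1 := by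
  have hp1 : (List.filter (fun i => decide (i ≤ (n1 : Int)) && decide (k - i ≤ (n2 : Int)))
      (PySem.List.pyRange 0 (k + 1) 1)).Pairwise (· < ·) :=
    (PySem.List.pairwise_lt_pyRange_one 0 (k+1)).sublist List.filter_sublist
  have hp2 := PySem.List.pairwise_lt_pyRange_one (max 0 (k - (n2 : Int))) (min k (n1 : Int) + 1)
  have hmem : ∀ x, x ∈ (PySem.List.pyRange 0 (k + 1) 1).filter
      (fun i => decide (i ≤ (n1 : Int)) && decide (k - i ≤ (n2 : Int)))
      ↔ x ∈ PySem.List.pyRange (max 0 (k - (n2 : Int))) (min k (n1 : Int) + 1) 1 := by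
    intro x
    simp [List.mem_filter, PySem.List.mem_pyRange_one]
    omega
  exact ((List.perm_ext_iff_of_nodup
      ((PySem.List.nodup_pyRange_one 0 (k+1)).filter _)
      (PySem.List.nodup_pyRange_one _ _)).2 hmem).eq_of_pairwise
      (fun a b _ _ h1 h2 => absurd h2 (not_lt.2 h1.le)) hp1 hp2

theorem fold_opt (g : Int → List Int) :
    ∀ (is : List Int) (m : List Int),
    is.foldl (fun best i =>
        let c := g i
        match best with
        | none => some c
        | some mm => if pyListGt c mm then some c else some mm) (some m)
      = some (is.foldl (fun mm i => if pyListGt (g i) mm then g i else mm) m) := by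
  intro is
  induction is with
  | nil => intro m; rfl
  | cons i is ih =>
      intro m
      simp only [List.foldl_cons]
      by_cases h : pyListGt (g i) m <;> simp [h, ih]

theorem main_spec (nums1 nums2 : List Int) (k : Int) (hpre : Pre_maxNumber_1 nums1 nums2 k) :
    maxNumber_1 nums1 nums2 k = maxNumber_1_alt nums1 nums2 k := by
  obtain ⟨hk0, hk⟩ := hpre
  unfold maxNumber_1 maxNumber_1_alt
  simp only
  rw [filter_range k nums1.length nums2.length]
  have hfg : ∀ i, i ≤ (nums1.length : Int) → k - i ≤ (nums2.length : Int) →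
      pvMergeA (pvPrepA nums1 i) (pvPrepA nums2 (k - i))
        = pvMergeB (pvPick nums1 i) (pvPick nums2 (k - i)) := by
    intro i h1 h2
    rw [merge_eq, prep_eq nums1 i h1, prep_eq nums2 (k - i) h2]
  have hlt : max 0 (k - (nums2.length : Int)) < min k (nums1.length : Int) + 1 := by omega
  rw [PySem.List.pyRange_one_cons hlt]
  set lo := max 0 (k - (nums2.length : Int)) with hlo
  set rest := PySem.List.pyRange (lo + 1) (min k (nums1.length : Int) + 1) 1 with hrest
  simp only [List.map_cons, List.foldl_cons]
  rw [fold_opt (fun i => pvMergeB (pvPick nums1 i) (pvPick nums2 (k - i))) rest]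
  simp only [Option.getD_some]
  rw [List.foldl_map]
  rw [hfg lo (by omega) (by omega)]
  apply PySem.List.foldl_congr_mem
  intro m i hi
  rw [PySem.List.mem_pyRange_one] at hi
  rw [hfg i (by omega) (by omega)]

-- ===== VERDICT (by name: the statement is the Claim_ definition above) =====
theorem maxNumber_1_spec : Claim_equal_maxNumber_1 := by
  intro nums1 nums2 k _ hpre
  unfold Spec_maxNumber_1
  exact main_spec nums1 nums2 k hpre
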